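-- pv_equiv track=rewrite | github.com/Lazybones3/tts-latex | handle_latex.py | replace_symbol
-- ===== SOURCE A (Python) =====
-- def replace_symbol(text: str):
--   d = {
--     "\%": " percent",
--     "_": " sub ",
--     "=": " equals ",
--     "+": " plus ",
--     "/": " or ",
--     "^": " to the "
--   }
--   for k, v in d.items():
--     # Percent symbols
--     text = text.replace(k, v)
--   return text
-- ===== SOURCE B (Python) =====
-- def replace_symbol(text: str):
--   single = {"_": " sub ", "=": " equals ", "+": " plus ", "/": " or ", "^": " to the "}
--   out = []
--   i = 0
--   n = len(text)
--   while i < n: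
--     if text.startswith("\%", i):
--       out.append(" percent")
--       i += 2
--     else:
--       c = text[i]
--       out.append(single.get(c, c))
--       i += 1
--   return "".join(out)
-- ===== Notes on version B (the rewrite author's own statement) =====
-- stated objective: alternative
-- what changed: Replaces A's six sequential full-string .replace passes with a single left-to-right scan that matches the two-character backslash-percent pattern first and otherwise substitutes per character from a dict, building the output in one buffer.
import Mathlib
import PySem

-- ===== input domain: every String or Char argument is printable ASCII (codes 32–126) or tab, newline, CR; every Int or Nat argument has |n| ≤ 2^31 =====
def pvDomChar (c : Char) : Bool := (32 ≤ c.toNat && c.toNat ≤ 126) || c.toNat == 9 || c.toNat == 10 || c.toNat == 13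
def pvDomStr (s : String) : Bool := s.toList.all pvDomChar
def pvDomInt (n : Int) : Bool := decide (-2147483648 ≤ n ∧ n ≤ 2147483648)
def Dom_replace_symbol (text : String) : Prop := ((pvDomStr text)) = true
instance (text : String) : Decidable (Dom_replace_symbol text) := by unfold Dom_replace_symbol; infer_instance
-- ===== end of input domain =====

-- B replaces A's six sequential full-string .replace passes by one left-to-right scan
-- (objective: alternative/simpler single traversal; return value is identical on all inputs).

-- ===== PORT A =====
-- A builds a dict literal, then loops over its items replacing each key by its value.
def replace_symbol (text : String) : String :=
  let d : PySem.Dict String String :=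
    ((((((PySem.Dict.empty).insert "\\%" " percent").insert "_" " sub ").insert
        "=" " equals ").insert "+" " plus ").insert "/" " or ").insert "^" " to the "
  d.items.foldl (fun t kv => PySem.Str.replace t kv.1 kv.2) text

-- ===== PORT B =====
-- Source B's dict `single` has five distinct one-char keys; its .get(c, c) is ported as this
-- first-match lookup chain (exact: lookup in a literal dict is first match).
def bsub (c : Char) : List Char :=
  if c = '_' then " sub ".toList
  else if c = '=' then " equals ".toList
  else if c = '+' then " plus ".toList
  else if c = '/' then " or ".toList
  else if c = '^' then " to the ".toList
  else [c]

-- Source B's while loop over the index i, buffer `out`: at each position test the two-char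
-- pattern "\%" first (startswith at i), else emit the single-char substitution.
def scanB : List Char → List Char
  | [] => []
  | c :: t =>
    if c = '\\' ∧ t.head? = some '%' then " percent".toList ++ scanB t.tail
    else bsub c ++ scanB t
termination_by l => l.length
decreasing_by all_goals simp [List.length_tail]

def replace_symbol_alt (text : String) : String := String.ofList (scanB text.toList)

-- ===== PRECONDITION & SPEC =====
def Spec_replace_symbol (text : String) (out : String) : Prop := out = replace_symbol_alt text
instance (text : String) (out : String) : Decidable (Spec_replace_symbol text out) := by unfold Spec_replace_symbol; infer_instance

-- ===== CLAIM (what is proved, stated in full; the proofs are below) =====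
def Claim_equal_replace_symbol : Prop := ∀ (text : String), Dom_replace_symbol text → Spec_replace_symbol text (replace_symbol text)

-- ===== LEMMAS AND PROOFS =====

-- single-character replace is a flatMap
theorem go_single (c : Char) (v : List Char) :
    ∀ (fuel : Nat) (l acc : List Char), l.length ≤ fuel →
      PySem.Chars.replace.go [c] v fuel l acc
        = acc.reverse ++ l.flatMap (fun x => if x = c then v else [x]) := by
  intro fuel
  induction fuel with
  | zero =>
    intro l acc h
    have : l = [] := List.eq_nil_of_length_eq_zero (Nat.le_zero.mp h)
    subst this; simp [PySem.Chars.replace.go]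
  | succ f ih =>
    intro l acc h
    cases l with
    | nil => simp [PySem.Chars.replace.go]
    | cons x t =>
      simp only [PySem.Chars.replace.go, List.isPrefixOf, Bool.and_true]
      by_cases hx : x = c
      · subst hx
        simp only [beq_self_eq_true, if_true]
        rw [ih _ _ (by simpa using Nat.le_of_succ_le_succ h)]
        simp [List.flatMap_cons]
      · have : (c == x) = false := by simp [Ne.symm hx]
        simp only [this, if_neg, Bool.false_eq_true, not_false_eq_true]
        rw [ih _ _ (by simpa using Nat.le_of_succ_le_succ h)]
        simp [List.flatMap_cons, hx]

theorem replace_single (c : Char) (v s : List Char) :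
    PySem.Chars.replace s [c] v = s.flatMap (fun x => if x = c then v else [x]) := by
  simp only [PySem.Chars.replace, List.isEmpty_cons, Bool.false_eq_true, if_neg,
    not_false_eq_true]
  simpa using go_single c v s.length s [] le_rfl

-- the two-character "\%" replace, written as a scan
def scan2 : List Char → List Char
  | [] => []
  | c :: t =>
    if c = '\\' ∧ t.head? = some '%' then " percent".toList ++ scan2 t.tail
    else c :: scan2 t
termination_by l => l.length
decreasing_by all_goals simp [List.length_tail]

theorem go_pct (l : List Char) :
    ∀ (fuel : Nat) (acc : List Char), l.length ≤ fuel →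
      PySem.Chars.replace.go ['\\', '%'] " percent".toList fuel l acc
        = acc.reverse ++ scan2 l := by
  induction l using scan2.induct with
  | case1 =>
    intro fuel acc h
    cases fuel <;> simp [PySem.Chars.replace.go, scan2]
  | case2 c t hct ih =>
    obtain ⟨hc, hh⟩ := hct
    cases t with
    | nil => simp at hh
    | cons y t' =>
      simp only [List.head?_cons, Option.some.injEq] at hh
      subst hc; subst hh
      simp only [List.tail_cons] at ih
      intro fuel acc h
      cases fuel with
      | zero => simp at h
      | succ f =>
        have hpre : List.isPrefixOf ['\\', '%'] ('\\' :: '%' :: t') = true := by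
          simp [List.isPrefixOf]
        simp only [PySem.Chars.replace.go, hpre, if_true]
        have hdrop : List.drop (['\\', '%'].length) ('\\' :: '%' :: t') = t' := rfl
        rw [hdrop, ih f _ (by simp at h; omega)]
        simp [scan2]
  | case3 c t hct ih =>
    intro fuel acc h
    cases fuel with
    | zero => simp at h
    | succ f =>
      have hpre : List.isPrefixOf ['\\', '%'] (c :: t) = false := by
        cases t with
        | nil => simp [List.isPrefixOf]
        | cons y t' =>
          simp only [List.isPrefixOf, Bool.and_eq_false_iff]
          by_cases hc : c = '\\'
          · subst hc
            right
            have hy : y ≠ '%' := by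
              intro hy; exact hct ⟨rfl, by simp [hy]⟩
            simp [Ne.symm hy]
          · left; simp [Ne.symm hc]
      simp only [PySem.Chars.replace.go, hpre, Bool.false_eq_true, if_neg, not_false_eq_true]
      rw [ih _ _ (by simp at h ⊢; omega)]
      have : scan2 (c :: t) = c :: scan2 t := by
        rw [scan2]; simp [hct]
      simp [this]

theorem replace_pct (s : List Char) :
    PySem.Chars.replace s ['\\', '%'] " percent".toList = scan2 s := by
  simp only [PySem.Chars.replace, List.isEmpty_cons, Bool.false_eq_true, if_neg,
    not_false_eq_true]
  simpa using go_pct s s.length [] le_rfl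

-- the five single-char flatMaps compose to bsub
theorem compose_five (x : List Char) :
    ((((x.flatMap (fun c => if c = '_' then " sub ".toList else [c])).flatMap
        (fun c => if c = '=' then " equals ".toList else [c])).flatMap
        (fun c => if c = '+' then " plus ".toList else [c])).flatMap
        (fun c => if c = '/' then " or ".toList else [c])).flatMap
        (fun c => if c = '^' then " to the ".toList else [c])
      = x.flatMap bsub := by
  simp only [List.flatMap_assoc]
  apply List.flatMap_congr
  intro c _
  by_cases h1 : c = '_'; · subst h1; decide
  by_cases h2 : c = '='; · subst h2; decide
  by_cases h3 : c = '+'; · subst h3; decide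
  by_cases h4 : c = '/'; · subst h4; decide
  by_cases h5 : c = '^'; · subst h5; decide
  simp [h1, h2, h3, h4, h5, bsub]

-- applying bsub to the output of the "\%" scan gives B's scan
theorem flatMap_bsub_scan2 (l : List Char) : (scan2 l).flatMap bsub = scanB l := by
  induction l using scan2.induct with
  | case1 => simp [scan2, scanB]
  | case2 c t h ih =>
    rw [scan2, scanB]
    simp [h, ih, bsub]
  | case3 c t h ih =>
    rw [scan2, scanB]
    simp [h, ih]

-- ===== VERDICT (by name: the statement is the Claim_ definition above) =====
theorem replace_symbol_spec : Claim_equal_replace_symbol := by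
  intro text _
  unfold Spec_replace_symbol
  apply String.toList_inj.mp
  show (replace_symbol text).toList = (replace_symbol_alt text).toList
  have hA : replace_symbol text
      = PySem.Str.replace (PySem.Str.replace (PySem.Str.replace (PySem.Str.replace (PySem.Str.replace (PySem.Str.replace text "\\%" " percent") "_" " sub ") "=" " equals ") "+" " plus ") "/" " or ") "^" " to the " := rfl
  rw [hA]
  simp only [PySem.Str.toList_replace]
  have h2 : ("\\%" : String).toList = ['\\', '%'] := rfl
  rw [h2, replace_pct]
  rw [show ("_" : String).toList = ['_'] from rfl, show ("=" : String).toList = ['='] from rfl,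
    show ("+" : String).toList = ['+'] from rfl, show ("/" : String).toList = ['/'] from rfl,
    show ("^" : String).toList = ['^'] from rfl]
  rw [replace_single, replace_single, replace_single, replace_single, replace_single]
  rw [compose_five, flatMap_bsub_scan2]
  simp [replace_symbol_alt]
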